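-- pv_equiv track=rewrite | github.com/posl/comment_recommendation | script/mod_gen/2_time/zh/128_D/5.py | solve
-- ===== SOURCE A (Python) =====
-- def solve(N,K,V):
--     ans = 0
--     for l in range(min(N,K)+1):
--         for r in range(min(N,K)-l+1):
--             s = 0
--             t = []
--             for i in range(l):
--                 s += V[i]
--                 t.append(V[i])
--             for i in range(r):
--                 s += V[N-1-i]
--                 t.append(V[N-1-i])
--             t.sort()
--             for i in range(min(K-l-r,l+r)):
--                 if t[i] < 0:
--                     s -= t[i]
--             ans = max(ans,s)
--     return ans
-- ===== SOURCE B (Python) =====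
-- def _insort(a, x):
--     i = 0
--     while i < len(a) and a[i] <= x:
--         i += 1
--     a.insert(i, x)
--
-- def solve(N, K, V):
--     ans = 0
--     top = min(N, K)
--     for l in range(top + 1):
--         s = sum(V[:l])
--         negs = sorted([x for x in V[:l] if x < 0])
--         for r in range(top - l + 1):
--             m = min(K - l - r, l + r)
--             ans = max(ans, s - sum(negs[:m]))
--             if r < top - l:
--                 v = V[N - 1 - r]
--                 s += v
--                 if v < 0:
--                     _insort(negs, v)
--     return ans
-- ===== Notes on version B (the rewrite author's own statement) =====
-- stated objective: alternative
-- what changed: Instead of rebuilding and fully sorting the picked list for every (l,r) pair and scanning its sorted prefix, B keeps, per left-count l, a running sum and an incrementally maintained sorted list of the negative picks (one ordered insertion per new right element) and discards via a prefix-slice sum; intended as faster (a timing run read 12-17x on the sizes it finished but could not confirm the label at the largest size), claimed here only as a different algorithm.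
import Mathlib
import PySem

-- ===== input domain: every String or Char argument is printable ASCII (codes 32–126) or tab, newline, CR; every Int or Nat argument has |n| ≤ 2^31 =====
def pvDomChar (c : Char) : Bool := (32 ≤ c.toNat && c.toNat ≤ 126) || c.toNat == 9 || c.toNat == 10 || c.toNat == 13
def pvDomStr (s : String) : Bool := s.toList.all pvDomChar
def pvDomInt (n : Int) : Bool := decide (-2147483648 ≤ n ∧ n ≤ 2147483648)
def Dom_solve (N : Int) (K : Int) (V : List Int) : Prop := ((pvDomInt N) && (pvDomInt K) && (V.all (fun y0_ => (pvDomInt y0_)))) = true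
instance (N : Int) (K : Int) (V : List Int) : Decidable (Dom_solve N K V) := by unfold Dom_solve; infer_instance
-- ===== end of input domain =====

-- B replaces A's per-(l,r) rebuild + full sort by, per l, a running sum and an incrementally
-- maintained sorted list of negative picks (one ordered insertion per added right element).

-- ===== PORT A =====
def solve (N : Int) (K : Int) (V : List Int) : Int :=
  (PySem.List.pyRange 0 (min N K + 1) 1).foldl (fun ans l =>
    (PySem.List.pyRange 0 (min N K - l + 1) 1).foldl (fun ans r =>
      let st1 := (PySem.List.pyRange 0 l 1).foldl
        (fun (st : Int × List Int) i =>
          (st.1 + PySem.List.pyGetD V i 0, st.2 ++ [PySem.List.pyGetD V i 0])) (0, [])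
      let st2 := (PySem.List.pyRange 0 r 1).foldl
        (fun (st : Int × List Int) i =>
          (st.1 + PySem.List.pyGetD V (N - 1 - i) 0, st.2 ++ [PySem.List.pyGetD V (N - 1 - i) 0])) st1
      let t := PySem.List.sorted st2.2 (fun x => x) false
      let s := (PySem.List.pyRange 0 (min (K - l - r) (l + r)) 1).foldl
        (fun s i => if PySem.List.pyGetD t i 0 < 0 then s - PySem.List.pyGetD t i 0 else s) st2.1
      max ans s) ans) 0

-- ===== PORT B =====
-- Source B's _insort: insert x into the sorted list a before the first element strictly greater
def insortInt (x : Int) : List Int → List Int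
  | [] => [x]
  | y :: ys => if y ≤ x then y :: insortInt x ys else x :: y :: ys

def solve_alt (N : Int) (K : Int) (V : List Int) : Int :=
  let top := min N K
  (PySem.List.pyRange 0 (top + 1) 1).foldl (fun ans l =>
    let s0 := (PySem.List.slice V none (some l)).sum
    let negs0 := PySem.List.sorted
      ((PySem.List.slice V none (some l)).filter (fun x => x < 0)) (fun x => x) false
    ((PySem.List.pyRange 0 (top - l + 1) 1).foldl
      (fun (st : Int × Int × List Int) r =>
        let m := min (K - l - r) (l + r)
        let ans' := max st.1 (st.2.1 - (PySem.List.slice st.2.2 none (some m)).sum)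
        if r < top - l then
          let v := PySem.List.pyGetD V (N - 1 - r) 0
          (ans', st.2.1 + v, if v < 0 then insortInt v st.2.2 else st.2.2)
        else
          (ans', st.2.1, st.2.2))
      (ans, s0, negs0)).1) 0

-- ===== PRECONDITION & SPEC =====
-- Pre_ excludes exactly the inputs on which Python A raises IndexError
-- (some left/right pick with l+r ≥ 1 is taken although V has fewer than N elements).
def Pre_solve (N : Int) (K : Int) (V : List Int) : Prop := 0 < min N K → N ≤ (V.length : Int)
instance (N : Int) (K : Int) (V : List Int) : Decidable (Pre_solve N K V) := by
  unfold Pre_solve; infer_instance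
def pvWitness_solve : Int × Int × List Int := (3, 2, [1, -2, 3])

def Spec_solve (N : Int) (K : Int) (V : List Int) (out : Int) : Prop := out = solve_alt N K V
instance (N : Int) (K : Int) (V : List Int) (out : Int) : Decidable (Spec_solve N K V out) := by
  unfold Spec_solve; infer_instance

-- ===== CLAIM (what is proved, stated in full; the proofs are below) =====
def Claim_equal_solve : Prop := ∀ (N : Int) (K : Int) (V : List Int),
  Dom_solve N K V → Pre_solve N K V → Spec_solve N K V (solve N K V)

-- ===== LEMMAS AND PROOFS =====

-- the picked elements for a pair (l, r): l from the front, r from the back (back-to-front)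
def gV (N : Int) (V : List Int) (l r : Int) : List Int :=
  (PySem.List.pyRange 0 l 1).map (fun i => PySem.List.pyGetD V i 0)
    ++ (PySem.List.pyRange 0 r 1).map (fun i => PySem.List.pyGetD V (N - 1 - i) 0)

-- the sorted list of negative picks
def snegL (t : List Int) : List Int :=
  PySem.List.sorted (t.filter (fun x => x < 0)) (fun x => x) false

-- the value both programs compute for a pair (l, r)
def valSpec (N K : Int) (V : List Int) (l r : Int) : Int :=
  (gV N V l r).sum - ((snegL (gV N V l r)).take (min (K - l - r) (l + r)).toNat).sum

lemma insort_perm (v : Int) (ys : List Int) : (insortInt v ys).Perm (v :: ys) := by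
  induction ys with
  | nil => simp [insortInt]
  | cons y ys ih =>
    simp only [insortInt]
    split
    · exact (ih.cons y).trans (List.Perm.swap v y ys)
    · exact List.Perm.refl _

lemma insort_pairwise {v : Int} {ys : List Int} (h : ys.Pairwise (· ≤ ·)) :
    (insortInt v ys).Pairwise (· ≤ ·) := by
  induction ys with
  | nil => simp [insortInt]
  | cons y ys ih =>
    rw [List.pairwise_cons] at h
    simp only [insortInt]
    split
    · rename_i hyv
      rw [List.pairwise_cons]
      refine ⟨fun b hb => ?_, ih h.2⟩
      rcases List.mem_cons.mp ((insort_perm v ys).mem_iff.mp hb) with rfl | hb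
      · exact hyv
      · exact h.1 b hb
    · rename_i hyv
      rw [List.pairwise_cons]
      refine ⟨fun b hb => ?_, List.pairwise_cons.mpr h⟩
      have hv : v ≤ y := le_of_lt (lt_of_not_ge hyv)
      rcases List.mem_cons.mp hb with rfl | hb
      · exact hv
      · exact hv.trans (h.1 b hb)

lemma insort_sorted (v : Int) (xs : List Int) :
    PySem.List.sorted (xs ++ [v]) (fun x => x) false
      = insortInt v (PySem.List.sorted xs (fun x => x) false) := by
  apply PySem.List.sorted_id_eq_of_perm_of_pairwise
  · exact (insort_perm _ _).trans
      (((PySem.List.sorted_perm xs _ _).cons v).trans (List.perm_append_singleton v xs).symm)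
  · exact insort_pairwise (PySem.List.sorted_pairwise xs _)

lemma sorted_filter (xs : List Int) (p : Int → Bool) :
    (PySem.List.sorted xs (fun x => x) false).filter p
      = PySem.List.sorted (xs.filter p) (fun x => x) false :=
  (PySem.List.sorted_id_eq_of_perm_of_pairwise _ _
    ((PySem.List.sorted_perm xs _ _).filter p)
    ((PySem.List.sorted_pairwise xs _).filter p)).symm

-- A's discard loop over a sorted list subtracts exactly the first n negatives
lemma foldl_neg_prefix (u : List Int) (hu : u.Pairwise (· ≤ ·)) :
    ∀ (n : Nat) (a : Int),
      (List.range n).foldl (fun s k => if u.getD k 0 < 0 then s - u.getD k 0 else s) a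
        = a - ((u.filter (fun x => x < 0)).take n).sum := by
  induction u with
  | nil =>
    intro n a
    simp [List.getD]
  | cons x us ih =>
    intro n a
    cases n with
    | zero => simp
    | succ n =>
      rw [List.range_succ_eq_map, List.foldl_cons, List.foldl_map]
      have hbody : (fun (s : Int) (k : Nat) =>
          if (x :: us).getD k.succ 0 < 0 then s - (x :: us).getD k.succ 0 else s)
          = (fun (s : Int) (k : Nat) => if us.getD k 0 < 0 then s - us.getD k 0 else s) := rfl
      have h0 : (x :: us).getD 0 0 = x := rfl
      rw [List.pairwise_cons] at hu
      by_cases hneg : x < 0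
      · rw [h0, if_pos hneg, hbody, ih hu.2 n (a - x),
          List.filter_cons_of_pos (by simpa using hneg), List.take_succ_cons, List.sum_cons]
        ring
      · have hfil : us.filter (fun x => x < 0) = [] := by
          rw [List.filter_eq_nil_iff]
          intro b hb
          simpa using not_lt.mpr ((not_lt.mp hneg).trans (hu.1 b hb))
        rw [h0, if_neg hneg, hbody, ih hu.2 n a,
          List.filter_cons_of_neg (by simpa using hneg), hfil]
        simp

-- A's discard loop, phrased on the (sorted) picked list
lemma A_tail (t : List Int) (m a : Int) :
    (PySem.List.pyRange 0 m 1).foldl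
      (fun s i => if PySem.List.pyGetD (PySem.List.sorted t (fun x => x) false) i 0 < 0
        then s - PySem.List.pyGetD (PySem.List.sorted t (fun x => x) false) i 0 else s) a
    = a - ((PySem.List.sorted (t.filter (fun x => x < 0)) (fun x => x) false).take m.toNat).sum := by
  rw [PySem.List.pyRange_one 0 m, Int.sub_zero, List.foldl_map]
  have hbody : (fun (s : Int) (k : Nat) =>
      if PySem.List.pyGetD (PySem.List.sorted t (fun x => x) false) (0 + (k : Int)) 0 < 0
      then s - PySem.List.pyGetD (PySem.List.sorted t (fun x => x) false) (0 + (k : Int)) 0 else s)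
      = (fun (s : Int) (k : Nat) =>
      if (PySem.List.sorted t (fun x => x) false).getD k 0 < 0
      then s - (PySem.List.sorted t (fun x => x) false).getD k 0 else s) := by
    funext s k
    simp only [zero_add, PySem.List.pyGetD_natCast]
  rw [hbody, foldl_neg_prefix _ (PySem.List.sorted_pairwise t (fun x => x)), sorted_filter]

-- growing the pair by one right element
lemma gV_succ (N : Int) (V : List Int) (l r : Int) (hr : 0 ≤ r) :
    gV N V l (r + 1) = gV N V l r ++ [PySem.List.pyGetD V (N - 1 - r) 0] := by
  unfold gV
  rw [PySem.List.pyRange_one_succ_right hr, List.map_append, List.append_assoc]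
  rfl

lemma snegL_append_singleton (t : List Int) (v : Int) :
    snegL (t ++ [v]) = if v < 0 then insortInt v (snegL t) else snegL t := by
  unfold snegL
  rw [List.filter_append]
  by_cases hv : v < 0
  · rw [if_pos hv]
    have h1 : List.filter (fun x => x < 0) [v] = [v] := by simp [hv]
    rw [h1, insort_sorted]
  · rw [if_neg hv]
    have h1 : List.filter (fun x => x < 0) [v] = [] := by simp [hv]
    rw [h1, List.append_nil]

-- the left part alone is the prefix slice
lemma gV_zero (N : Int) (V : List Int) (l : Int) (h0 : 0 ≤ l) (hlen : l ≤ (V.length : Int)) :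
    gV N V l 0 = V.take l.toNat := by
  unfold gV
  rw [PySem.List.pyRange_one_eq_nil (le_refl 0), List.map_nil, List.append_nil,
    PySem.List.pyRange_one 0 l, List.map_map]
  have hle : l.toNat ≤ V.length := by omega
  apply List.ext_getElem
  · simp [hle]
  · intro i hi hi'
    have hiv : i < V.length := by simp at hi; omega
    simp [hiv, List.getD_eq_getElem?_getD]

-- A's inner loop computes the running max of valSpec
lemma A_inner (N K : Int) (V : List Int) (l : Int) (ans : Int) :
    (PySem.List.pyRange 0 (min N K - l + 1) 1).foldl (fun ans r =>
      let st1 := (PySem.List.pyRange 0 l 1).foldl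
        (fun (st : Int × List Int) i =>
          (st.1 + PySem.List.pyGetD V i 0, st.2 ++ [PySem.List.pyGetD V i 0])) (0, [])
      let st2 := (PySem.List.pyRange 0 r 1).foldl
        (fun (st : Int × List Int) i =>
          (st.1 + PySem.List.pyGetD V (N - 1 - i) 0, st.2 ++ [PySem.List.pyGetD V (N - 1 - i) 0])) st1
      let t := PySem.List.sorted st2.2 (fun x => x) false
      let s := (PySem.List.pyRange 0 (min (K - l - r) (l + r)) 1).foldl
        (fun s i => if PySem.List.pyGetD t i 0 < 0 then s - PySem.List.pyGetD t i 0 else s) st2.1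
      max ans s) ans
    = (PySem.List.pyRange 0 (min N K - l + 1) 1).foldl
        (fun a r => max a (valSpec N K V l r)) ans := by
  apply PySem.List.foldl_congr_mem
  intro acc r _
  dsimp only
  congr 1
  rw [PySem.List.foldl_prod_mk (f := fun s i => s + PySem.List.pyGetD V i 0)
    (g := fun s i => s ++ [PySem.List.pyGetD V i 0]),
    PySem.List.foldl_add _ (fun i => PySem.List.pyGetD V i 0) 0,
    PySem.List.foldl_append_singleton_eq_map (fun i => PySem.List.pyGetD V i 0),
    PySem.List.foldl_prod_mk (f := fun s i => s + PySem.List.pyGetD V (N - 1 - i) 0)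
    (g := fun s i => s ++ [PySem.List.pyGetD V (N - 1 - i) 0]),
    PySem.List.foldl_add _ (fun i => PySem.List.pyGetD V (N - 1 - i) 0),
    PySem.List.foldl_append_singleton_eq_map (fun i => PySem.List.pyGetD V (N - 1 - i) 0)]
  simp only [List.nil_append, zero_add]
  rw [A_tail]
  unfold valSpec snegL gV
  rw [List.sum_append]

-- B's inner loop: invariant (s, negs) = (sum of picks, sorted negative picks)
lemma B_inner (N K : Int) (V : List Int) (l : Int) (hl0 : 0 ≤ l) :
    ∀ (fuel : Nat) (j ans : Int), 0 ≤ j → j + fuel = min N K - l + 1 →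
    ((PySem.List.pyRange j (min N K - l + 1) 1).foldl
      (fun (st : Int × Int × List Int) r =>
        let m := min (K - l - r) (l + r)
        let ans' := max st.1 (st.2.1 - (PySem.List.slice st.2.2 none (some m)).sum)
        if r < min N K - l then
          let v := PySem.List.pyGetD V (N - 1 - r) 0
          (ans', st.2.1 + v, if v < 0 then insortInt v st.2.2 else st.2.2)
        else
          (ans', st.2.1, st.2.2))
      (ans, (gV N V l j).sum, snegL (gV N V l j))).1
    = (PySem.List.pyRange j (min N K - l + 1) 1).foldl
        (fun a r => max a (valSpec N K V l r)) ans := by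
  intro fuel
  induction fuel with
  | zero =>
    intro j ans hj0 hj
    rw [PySem.List.pyRange_one_eq_nil (by omega)]
    rfl
  | succ fuel ih =>
    intro j ans hj0 hj
    have hjlt : j < min N K - l + 1 := by omega
    have hK : min N K ≤ K := min_le_right N K
    have hm : 0 ≤ min (K - l - j) (l + j) := by omega
    rw [PySem.List.pyRange_one_cons hjlt]
    simp only [List.foldl_cons]
    rw [PySem.List.slice_to _ hm]
    by_cases hlast : j < min N K - l
    · rw [if_pos hlast]
      have hsum : (gV N V l j).sum + PySem.List.pyGetD V (N - 1 - j) 0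
          = (gV N V l (j + 1)).sum := by
        rw [gV_succ N V l j hj0, List.sum_append]
        simp
      have hneg : (if PySem.List.pyGetD V (N - 1 - j) 0 < 0
            then insortInt (PySem.List.pyGetD V (N - 1 - j) 0) (snegL (gV N V l j))
            else snegL (gV N V l j))
          = snegL (gV N V l (j + 1)) := by
        rw [gV_succ N V l j hj0, snegL_append_singleton]
      rw [hsum, hneg]
      exact ih (j + 1) _ (by omega) (by omega)
    · rw [if_neg hlast]
      rw [PySem.List.pyRange_one_eq_nil (by omega)]
      rfl

-- ===== VERDICT (by name: the statement is the Claim_ definition above) =====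
theorem solve_spec : Claim_equal_solve := by
  intro N K V _ hpre
  unfold Spec_solve solve solve_alt
  apply PySem.List.foldl_congr_mem
  intro ans l hl
  rw [PySem.List.mem_pyRange_one] at hl
  have hl0 : 0 ≤ l := hl.1
  have hlen : l ≤ (V.length : Int) := by
    by_cases htop : 0 < min N K
    · have h1 := hpre htop
      have h2 := min_le_left N K
      omega
    · omega
  dsimp only
  have hslice : PySem.List.slice V none (some l) = gV N V l 0 := by
    rw [PySem.List.slice_to _ hl0, gV_zero N V l hl0 hlen]
  rw [hslice, A_inner N K V l ans]
  exact (B_inner N K V l hl0 (min N K - l + 1 - 0).toNat 0 ans (le_refl 0) (by omega)).symm
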